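-- pv_equiv track=rewrite | github.com/GreenFuze/spade | context.py | _ancestor_chain
-- ===== SOURCE A (Python) =====
-- from typing import Dict, List
--
-- def _ancestor_chain(rel: str) -> List[str]:
--     """
--     Return root→…→parent chain as relpaths.
--
--     Args:
--         rel: Relative path like ".", "api", "web/subdir"
--
--     Returns:
--         List of ancestor paths, e.g. for "a/b/c": [".","a","a/b"]
--         For ".", return [] (no ancestors)
--     """
--     if rel == ".":
--         return []
--
--     parts = rel.split("/")
--     if len(parts) == 1:
--         # Single-level path like "api" -> just root
--         return ["."]
--
--     ancestors = []
--     current = ""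
--
--     for part in parts[:-1]:  # Exclude the last part (current directory)
--         if current:
--             current = f"{current}/{part}"
--         else:
--             current = part
--         ancestors.append(current)
--
--     # Add root if we have any ancestors
--     if ancestors:
--         ancestors.insert(0, ".")
--
--     return ancestors
-- ===== SOURCE B (Python) =====
-- from typing import List
--
--
-- def _chain(rel: str) -> List[str]:
--     if "/" not in rel:
--         return ["."]
--     parent = rel.rsplit("/", 1)[0]
--     return _chain(parent) + [parent]
--
--
-- def _ancestor_chain(rel: str) -> List[str]:
--     if rel == ".":
--         return []
--     return _chain(rel)
-- ===== Notes on version B (the rewrite author's own statement) =====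
-- stated objective: alternative
-- what changed: Replaces A's split-into-parts plus forward accumulating loop (with insert(0) and emptiness checks) by a short recursion that strips the last path component with rsplit('/',1) and recurses on the parent.
-- intended difference: On relpaths that begin with '/' and contain a second '/', A's truthiness test on the accumulated prefix silently drops the leading slash(es) from every ancestor it builds (e.g. '/a/b' -> ['.', '', 'a']), while B returns the literal parent prefixes ['.', '', '/a'], which are the actual ancestor paths of the input. — e.g. on _ancestor_chain("/a/b"): A returns [".", "", "a"], B returns [".", "", "/a"]
import Mathlib
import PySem

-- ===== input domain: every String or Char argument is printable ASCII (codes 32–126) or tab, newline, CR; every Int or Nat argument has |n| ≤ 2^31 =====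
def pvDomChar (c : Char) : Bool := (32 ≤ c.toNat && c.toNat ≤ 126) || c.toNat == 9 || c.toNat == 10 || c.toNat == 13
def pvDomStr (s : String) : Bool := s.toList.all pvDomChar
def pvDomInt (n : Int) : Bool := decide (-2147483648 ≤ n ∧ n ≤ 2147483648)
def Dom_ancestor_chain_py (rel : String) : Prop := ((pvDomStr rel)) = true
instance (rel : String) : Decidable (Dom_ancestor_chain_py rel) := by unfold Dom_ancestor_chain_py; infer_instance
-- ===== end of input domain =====

-- B replaces A's split-parts + forward accumulating loop by a recursion that strips the
-- last path component (rsplit) and recurses on the parent; same cost, different decomposition.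


-- ===== PORT A =====
-- the body of A's `for part in parts[:-1]` loop; state = (ancestors, current)
def ancestorStep (st : List (List Char) × List Char) (part : List Char) : List (List Char) × List Char :=
  let current := if st.2 ≠ [] then st.2 ++ '/' :: part else part  -- `if current:` / f"{current}/{part}"
  (st.1 ++ [current], current)

def ancestor_chain_py (rel : String) : List String :=
  if rel = "." then []
  else
    let parts := PySem.Chars.splitOn rel.toList ['/']            -- rel.split("/")
    if parts.length = 1 then ["."]
    else
      let st := parts.dropLast.foldl ancestorStep ([], [])       -- parts[:-1] = dropLast
      let ancestors := if st.1 ≠ [] then ['.'] :: st.1 else st.1 -- `if ancestors: ancestors.insert(0, ".")`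
      ancestors.map String.mk

-- ===== PORT B =====
-- port of Source B's `_chain`; fuel (= |cs| at the top call) only makes the recursion structural.
-- `"/" in rel` with a one-char needle is exactly membership (cs.contains '/');
-- `rel.rsplit("/", 1)[0]` is the prefix before the LAST '/', i.e. take (|cs| - 1 - idxOf '/' in reverse).
def chainAuxF : Nat → List Char → List (List Char)
  | 0, _ => [['.']]
  | fuel + 1, cs =>
    if cs.contains '/' then
      let parent := cs.take (cs.length - 1 - cs.reverse.idxOf '/')
      chainAuxF fuel parent ++ [parent]
    else [['.']]

def ancestor_chain_py_alt (rel : String) : List String :=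
  if rel = "." then []
  else (chainAuxF rel.toList.length rel.toList).map String.mk

-- ===== PRECONDITION & SPEC =====
-- On relpaths that begin with '/' and contain a second '/', A's truthiness test on the accumulated prefix
-- silently drops the leading slash(es) from every ancestor it builds (e.g. '/a/b' -> ['.', '', 'a']),
-- while B returns the literal parent prefixes ['.', '', '/a'], the actual ancestor paths of the input.
def D_ancestor_chain_py (rel : String) : Prop :=
  rel.toList.head? = some '/' ∧ '/' ∈ rel.toList.tail
instance (rel : String) : Decidable (D_ancestor_chain_py rel) := by
  unfold D_ancestor_chain_py; infer_instance

def Spec_ancestor_chain_py (rel : String) (out : List String) : Prop :=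
  ¬ D_ancestor_chain_py rel → out = ancestor_chain_py_alt rel
instance (rel : String) (out : List String) : Decidable (Spec_ancestor_chain_py rel out) := by
  unfold Spec_ancestor_chain_py; infer_instance

def pvDiffWitness_ancestor_chain_py : String := "/a/b"
def pvDiffWitnessOut_ancestor_chain_py : (List String) × (List String) :=
  ([".", "", "a"], [".", "", "/a"])

-- ===== CLAIM (what is proved, stated in full; the proofs are below) =====
def Claim_unchanged_ancestor_chain_py : Prop :=
  ∀ (rel : String), Dom_ancestor_chain_py rel → Spec_ancestor_chain_py rel (ancestor_chain_py rel)
def Claim_changed_ancestor_chain_py : Prop :=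
  Dom_ancestor_chain_py (pvDiffWitness_ancestor_chain_py) ∧
  D_ancestor_chain_py (pvDiffWitness_ancestor_chain_py) ∧
  ancestor_chain_py (pvDiffWitness_ancestor_chain_py) = pvDiffWitnessOut_ancestor_chain_py.1 ∧
  ancestor_chain_py_alt (pvDiffWitness_ancestor_chain_py) = pvDiffWitnessOut_ancestor_chain_py.2 ∧
  pvDiffWitnessOut_ancestor_chain_py.1 ≠ pvDiffWitnessOut_ancestor_chain_py.2
def Claim_exact_ancestor_chain_py : Prop :=
  ∀ (rel : String), Dom_ancestor_chain_py rel → D_ancestor_chain_py rel →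
    ancestor_chain_py rel ≠ ancestor_chain_py_alt rel

-- ===== LEMMAS AND PROOFS =====

-- reference split of a char list at '/' (pre = chars of the current piece read so far)
def sp (pre : List Char) : List Char → List (List Char)
  | [] => [pre]
  | c :: r => if c = '/' then pre :: sp [] r else sp (pre ++ [c]) r

-- join with '/'
def joinSl : List (List Char) → List Char
  | [] => []
  | [p] => p
  | p :: q :: l => p ++ '/' :: joinSl (q :: l)

lemma joinSl_cons (p : List Char) (l : List (List Char)) (h : l ≠ []) :
    joinSl (p :: l) = p ++ '/' :: joinSl l := by
  cases l with
  | nil => exact absurd rfl h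
  | cons q t => rfl

lemma joinSl_snoc (ps : List (List Char)) (p : List Char) (h : ps ≠ []) :
    joinSl (ps ++ [p]) = joinSl ps ++ '/' :: p := by
  induction ps with
  | nil => exact absurd rfl h
  | cons q t ih =>
    cases t with
    | nil => rfl
    | cons q' t' =>
      have ih' := ih (by simp)
      simp only [List.cons_append] at ih' ⊢
      rw [joinSl_cons q (q' :: (t' ++ [p])) (by simp), ih', joinSl_cons q (q' :: t') (by simp)]
      simp

lemma sp_ne_nil (cs pre : List Char) : sp pre cs ≠ [] := by
  induction cs generalizing pre with
  | nil => simp [sp]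
  | cons c r ih => by_cases h : c = '/' <;> simp [sp, h, ih]

lemma sp_join (cs pre : List Char) : joinSl (sp pre cs) = pre ++ cs := by
  induction cs generalizing pre with
  | nil => simp [sp, joinSl]
  | cons c r ih =>
    by_cases h : c = '/'
    · subst h
      rw [sp, if_pos rfl, joinSl_cons _ _ (sp_ne_nil r []), ih]
      simp
    · rw [sp, if_neg h, ih]
      simp

lemma sp_slashfree (cs pre : List Char) (hpre : '/' ∉ pre) :
    ∀ p ∈ sp pre cs, '/' ∉ p := by
  induction cs generalizing pre with
  | nil => simpa [sp] using hpre
  | cons c r ih =>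
    by_cases h : c = '/'
    · subst h
      rw [sp, if_pos rfl]
      intro p hp
      rcases List.mem_cons.1 hp with rfl | hp
      · exact hpre
      · exact ih [] (by simp) p hp
    · rw [sp, if_neg h]
      exact ih (pre ++ [c]) (by simp [hpre, Ne.symm h]) 

lemma sp_length (cs pre : List Char) :
    (sp pre cs).length = cs.count '/' + 1 := by
  induction cs generalizing pre with
  | nil => simp [sp]
  | cons c r ih =>
    by_cases h : c = '/'
    · subst h
      rw [sp, if_pos rfl]
      simp [ih]
    · rw [sp, if_neg h]
      rw [ih]
      simp [h]

-- the ancestor prefixes: joinSl of each proper nonempty prefix of the parts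
def ancList (ps : List (List Char)) : List (List Char) :=
  (List.range (ps.length - 1)).map (fun k => joinSl (ps.take (k + 1)))

lemma ancList_snoc (ps : List (List Char)) (p : List Char) (h : ps ≠ []) :
    ancList (ps ++ [p]) = ancList ps ++ [joinSl ps] := by
  have hlen : ps.length ≠ 0 := by simpa using h
  unfold ancList
  rw [List.length_append]
  simp only [List.length_cons, List.length_nil]
  have h1 : ps.length + 1 - 1 = (ps.length - 1) + 1 := by omega
  rw [h1, List.range_succ, List.map_append]
  congr 1
  · apply List.map_congr_left
    intro k hk
    have hk' : k < ps.length - 1 := List.mem_range.1 hk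
    rw [List.take_append_of_le_length (by omega)]
  · simp only [List.map_cons, List.map_nil]
    congr 1
    rw [Nat.sub_add_cancel (by omega), List.take_left]

lemma idxOf_append_not_mem (l t : List Char) (h : '/' ∉ l) :
    (l ++ '/' :: t).idxOf '/' = l.length := by
  induction l with
  | nil => simp
  | cons c r ih =>
    have hc : c ≠ '/' := by intro hc; exact h (by simp [hc])
    simp [List.cons_append, hc, ih (fun hm => h (by simp [hm]))]

lemma chainAuxF_nofree (fuel : Nat) (cs : List Char) (h : '/' ∉ cs) :
    chainAuxF fuel cs = [['.']] := by
  cases fuel with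
  | zero => rfl
  | succ f => rw [chainAuxF, if_neg (by simpa using h)]

lemma chainAuxF_join (ps : List (List Char)) (fuel : Nat) (hne : ps ≠ [])
    (hfree : ∀ p ∈ ps, '/' ∉ p) (hfuel : (joinSl ps).length ≤ fuel) :
    chainAuxF fuel (joinSl ps) = ['.'] :: ancList ps := by
  induction ps using List.reverseRecOn generalizing fuel with
  | nil => exact absurd rfl hne
  | append_singleton ts p ih =>
    by_cases hts : ts = []
    · subst hts
      rw [List.nil_append, show joinSl [p] = p from rfl,
        chainAuxF_nofree fuel p (hfree p (by simp))]
      simp [ancList]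
    · have hj : joinSl (ts ++ [p]) = joinSl ts ++ '/' :: p := joinSl_snoc ts p hts
      have hpf : '/' ∉ p := hfree p (by simp)
      have hlen : (joinSl ts ++ '/' :: p).length = (joinSl ts).length + 1 + p.length := by
        simp
        omega
      -- fuel is positive
      cases fuel with
      | zero => rw [hj] at hfuel; simp at hfuel
      | succ f =>
        rw [hj, chainAuxF, if_pos (by simp)]
        have hidx : (joinSl ts ++ '/' :: p).reverse.idxOf '/' = p.length := by
          rw [List.reverse_append]
          simp only [List.reverse_cons]
          rw [List.append_assoc]
          simp only [List.cons_append, List.nil_append]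
          rw [idxOf_append_not_mem p.reverse ((joinSl ts).reverse) (by simpa using hpf)]
          simp
        have htake : (joinSl ts ++ '/' :: p).take
            ((joinSl ts ++ '/' :: p).length - 1 - (joinSl ts ++ '/' :: p).reverse.idxOf '/')
            = joinSl ts := by
          rw [hidx, hlen]
          have : (joinSl ts).length + 1 + p.length - 1 - p.length = (joinSl ts).length := by omega
          rw [this, List.take_left]
        have hf : (joinSl ts).length ≤ f := by
          rw [hj] at hfuel
          simp at hfuel
          omega
        rw [htake]
        show chainAuxF f (joinSl ts) ++ [joinSl ts] = ['.'] :: ancList (ts ++ [p])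
        rw [ih f hts (fun q hq => hfree q (by simp [hq])) hf, ancList_snoc ts p hts]
        rfl

-- A's fold, once current is a nonempty join
lemma foldA (l : List (List Char)) (acc ps : List (List Char)) (hne : ps ≠ [])
    (hjoin : joinSl ps ≠ []) :
    l.foldl ancestorStep (acc, joinSl ps)
      = (acc ++ (List.range l.length).map (fun k => joinSl (ps ++ l.take (k + 1))), joinSl (ps ++ l)) := by
  induction l generalizing acc ps with
  | nil => simp
  | cons p l' ih =>
    have hstep : ancestorStep (acc, joinSl ps) p = (acc ++ [joinSl (ps ++ [p])], joinSl (ps ++ [p])) := by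
      unfold ancestorStep
      rw [joinSl_snoc ps p hne]
      simp [hjoin]
    rw [List.foldl_cons, hstep,
      ih (acc ++ [joinSl (ps ++ [p])]) (ps ++ [p]) (by simp) (by rw [joinSl_snoc ps p hne]; simp)]
    refine Prod.ext ?_ (by simp)
    rw [List.length_cons, List.range_succ_eq_map, List.map_cons, List.map_map]
    simp only [List.append_assoc, List.singleton_append]
    simp [Function.comp]

lemma go_zero (l cur : List Char) (acc : List (List Char)) :
    PySem.Chars.splitOn.go ['/'] 0 l cur acc = ((cur.reverse ++ l) :: acc).reverse := by
  rw [PySem.Chars.splitOn.go]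

lemma go_nil (f : Nat) (cur : List Char) (acc : List (List Char)) :
    PySem.Chars.splitOn.go ['/'] (f + 1) [] cur acc = (cur.reverse :: acc).reverse := by
  rw [PySem.Chars.splitOn.go]; simp

lemma go_cons (f : Nat) (c : Char) (rest cur : List Char) (acc : List (List Char)) :
    PySem.Chars.splitOn.go ['/'] (f + 1) (c :: rest) cur acc
      = if c = '/' then PySem.Chars.splitOn.go ['/'] f rest [] (cur.reverse :: acc)
        else PySem.Chars.splitOn.go ['/'] f rest (c :: cur) acc := by
  rw [PySem.Chars.splitOn.go]
  by_cases h : c = '/'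
  · simp [h, List.isPrefixOf]
  · simp only [List.isPrefixOf, if_neg h]
    rw [if_neg]
    intro hh
    simp at hh
    exact h hh.symm

lemma go_eq (l : List Char) : ∀ (fuel : Nat) (cur : List Char) (acc : List (List Char)),
    l.length ≤ fuel →
    PySem.Chars.splitOn.go ['/'] fuel l cur acc = acc.reverse ++ sp cur.reverse l := by
  induction l with
  | nil =>
    intro fuel cur acc _
    cases fuel with
    | zero => rw [go_zero]; simp [sp]
    | succ f => rw [go_nil]; simp [sp]
  | cons c rest ih =>
    intro fuel cur acc hf
    cases fuel with
    | zero => simp at hf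
    | succ f =>
      rw [go_cons]
      by_cases h : c = '/'
      · subst h
        rw [if_pos rfl, ih f [] (cur.reverse :: acc) (by simpa using hf)]
        simp [sp]
      · rw [if_neg h, ih f (c :: cur) acc (by simpa using hf)]
        simp [sp, h]

lemma splitOn_eq_sp (cs : List Char) : PySem.Chars.splitOn cs ['/'] = sp [] cs := by
  unfold PySem.Chars.splitOn
  rw [go_eq cs (cs.length + 1) [] [] (by omega)]
  simp

-- the fold only ever appends to the accumulator
lemma foldl_acc_prefix (l : List (List Char)) :
    ∀ (acc : List (List Char)) (cur : List Char),
    ∃ rest, (l.foldl ancestorStep (acc, cur)).1 = acc ++ rest := by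
  induction l with
  | nil => intro acc cur; exact ⟨[], by simp⟩
  | cons p l' ih =>
    intro acc cur
    obtain ⟨rest, hrest⟩ := ih (ancestorStep (acc, cur) p).1 (ancestorStep (acc, cur) p).2
    refine ⟨(if cur ≠ [] then cur ++ '/' :: p else p) :: rest, ?_⟩
    rw [List.foldl_cons]
    rw [show ancestorStep (acc, cur) p
        = ((acc, cur).1 ++ [if cur ≠ [] then cur ++ '/' :: p else p],
           if cur ≠ [] then cur ++ '/' :: p else p) from rfl] at hrest ⊢
    rw [hrest]
    simp

theorem unchanged_main (rel : String) (hD : ¬ D_ancestor_chain_py rel) :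
    ancestor_chain_py rel = ancestor_chain_py_alt rel := by
  by_cases hdot : rel = "."
  · simp [ancestor_chain_py, ancestor_chain_py_alt, hdot]
  · unfold ancestor_chain_py ancestor_chain_py_alt
    rw [if_neg hdot, if_neg hdot, splitOn_eq_sp]
    obtain ⟨q, t, hqt⟩ : ∃ q t, sp [] rel.toList = q :: t := by
      cases hsp : sp [] rel.toList with
      | nil => exact absurd hsp (sp_ne_nil _ _)
      | cons q t => exact ⟨q, t, rfl⟩
    have hjoin : joinSl (q :: t) = rel.toList := by rw [← hqt, sp_join]; rfl
    have hfree : ∀ p ∈ q :: t, '/' ∉ p := by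
      rw [← hqt]; exact sp_slashfree _ [] (by simp)
    have hB : chainAuxF rel.toList.length rel.toList = ['.'] :: ancList (q :: t) := by
      rw [← hjoin]
      exact chainAuxF_join (q :: t) _ (by simp) hfree le_rfl
    rw [hqt, hB]
    cases t with
    | nil =>
      rw [if_pos (by simp)]
      simp [ancList]
      rfl
    | cons t1 t2 =>
      rw [if_neg (by simp)]
      by_cases hq : q ≠ []
      · -- first part nonempty: the fold is the literal prefix joins
        have hdl : (q :: t1 :: t2).dropLast = q :: (t1 :: t2).dropLast := rfl
        have hfold := foldA (t1 :: t2).dropLast [q] [q] (by simp) hq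
        rw [show joinSl [q] = q from rfl] at hfold
        rw [hdl, List.foldl_cons,
          show ancestorStep (([] : List (List Char)), ([] : List Char)) q = ([q], q) by
            simp [ancestorStep]]
        rw [hfold]
        simp only []
        rw [if_pos (by simp)]
        -- [q] ++ prefix-joins of dropLast = ancList (q :: t1 :: t2)
        have hanc : ancList (q :: t1 :: t2)
            = q :: List.map (fun k => joinSl ([q] ++ List.take (k + 1) (t1 :: t2).dropLast))
                (List.range (t1 :: t2).dropLast.length) := by
          unfold ancList
          have hlen2 : (q :: t1 :: t2).length - 1 = (t1 :: t2).dropLast.length + 1 := by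
            simp
          rw [hlen2, List.range_succ_eq_map, List.map_cons, List.map_map]
          congr 1
          apply List.map_congr_left
          intro k hk
          have hk' : k < t2.length := by simpa using List.mem_range.1 hk
          have hdrop : List.take (k + 1) (t1 :: t2).dropLast = t1 :: List.take k t2 := by
            rw [List.dropLast_eq_take, List.take_take]
            have hmin : min (k + 1) ((t1 :: t2).length - 1) = k + 1 := by simp; omega
            rw [hmin, List.take_succ_cons]
          simp only [Function.comp_apply, List.singleton_append, List.take_succ_cons, hdrop]
        rw [hanc]
        simp
      · -- first part empty: rel starts with '/'; ¬D forces exactly one more part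
        have hq' : q = [] := not_not.mp hq
        subst hq'
        have hcs : rel.toList = '/' :: joinSl (t1 :: t2) := by
          rw [← hjoin, joinSl_cons [] (t1 :: t2) (by simp)]
          rfl
        have hnod : '/' ∉ joinSl (t1 :: t2) := by
          intro hmem
          exact hD ⟨by rw [hcs]; rfl, by rw [hcs]; simpa using hmem⟩
        have ht2 : t2 = [] := by
          cases t2 with
          | nil => rfl
          | cons r2 t3 =>
            exact absurd (by rw [joinSl_cons t1 (r2 :: t3) (by simp)]; simp) hnod
        subst ht2
        simp [ancestorStep, ancList, joinSl]

-- ===== VERDICT (by name: the statement is the Claim_ definition above) =====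
theorem ancestor_chain_py_spec : Claim_unchanged_ancestor_chain_py := by
  intro rel _ hD
  exact unchanged_main rel hD

theorem ancestor_chain_py_changed : Claim_changed_ancestor_chain_py := by
  unfold Claim_changed_ancestor_chain_py
  decide

theorem ancestor_chain_py_tight : Claim_exact_ancestor_chain_py := by
  intro rel _ hDrel
  obtain ⟨hhead, htail⟩ := hDrel
  obtain ⟨cs', hcs⟩ : ∃ cs', rel.toList = '/' :: cs' := by
    cases h : rel.toList with
    | nil => rw [h] at hhead; simp at hhead
    | cons c r =>
      rw [h] at hhead
      simp at hhead
      exact ⟨r, by rw [hhead]⟩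
  have htail' : '/' ∈ cs' := by rw [hcs] at htail; simpa using htail
  have hdot : rel ≠ "." := by
    intro h
    rw [h] at hcs
    simp at hcs
  obtain ⟨r1, r2, t3, hr⟩ : ∃ r1 r2 t3, sp [] cs' = r1 :: r2 :: t3 := by
    have hlen : (sp [] cs').length = cs'.count '/' + 1 := sp_length cs' []
    have hcount : 1 ≤ cs'.count '/' := List.one_le_count_iff.mpr htail'
    cases h1 : sp [] cs' with
    | nil => exact absurd h1 (sp_ne_nil _ _)
    | cons r1 t =>
      cases h2 : t with
      | nil => rw [h1, h2] at hlen; simp at hlen; omega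
      | cons r2 t3 => subst h2; exact ⟨r1, r2, t3, rfl⟩
  have hsp : sp [] rel.toList = [] :: r1 :: r2 :: t3 := by
    rw [hcs, sp, if_pos rfl, hr]
  -- the A side: its list begins ".", "", r1, …
  obtain ⟨rest0, hrest0⟩ :=
    foldl_acc_prefix ((r2 :: t3).dropLast) [[], r1] r1
  have hA : ancestor_chain_py rel
      = List.map String.mk (['.'] :: ([[], r1] ++ rest0)) := by
    unfold ancestor_chain_py
    rw [if_neg hdot, splitOn_eq_sp, hsp]
    simp only []
    rw [if_neg (by simp)]
    have hd : ([] :: r1 :: r2 :: t3).dropLast = [] :: r1 :: (r2 :: t3).dropLast := rfl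
    rw [hd, List.foldl_cons, List.foldl_cons,
      show ancestorStep (([] : List (List Char)), ([] : List Char)) [] = ([[]], []) by
        simp [ancestorStep],
      show ancestorStep ([([] : List Char)], ([] : List Char)) r1 = ([[], r1], r1) by
        simp [ancestorStep]]
    rw [(Prod.ext_iff.mp (Prod.mk.eta (p := List.foldl ancestorStep ([[], r1], r1) (r2 :: t3).dropLast))).1.symm] at hrest0
    rw [if_pos (by
      intro hnil
      rw [hrest0] at hnil
      simp at hnil)]
    congr 1
    rw [hrest0]
  -- the B side: its list begins ".", "", '/'::r1, …
  have hjoin : joinSl ([] :: r1 :: r2 :: t3) = rel.toList := by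
    rw [← hsp, sp_join]; rfl
  have hfree : ∀ p ∈ [] :: r1 :: r2 :: t3, '/' ∉ p := by
    rw [← hsp]; exact sp_slashfree _ [] (by simp)
  have hBv : ancestor_chain_py_alt rel
      = List.map String.mk (['.'] :: ancList ([] :: r1 :: r2 :: t3)) := by
    unfold ancestor_chain_py_alt
    rw [if_neg hdot, ← hjoin,
      chainAuxF_join ([] :: r1 :: r2 :: t3) _ (by simp) hfree le_rfl]
  intro hEq
  have hBidx : (ancList ([] :: r1 :: r2 :: t3))[1]? = some ('/' :: r1) := by
    unfold ancList
    rw [List.getElem?_map, List.getElem?_range (by simp)]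
    simp [joinSl]
  have h2 := congrArg (fun l => l[2]?) hEq
  simp only [] at h2
  rw [hA, hBv] at h2
  have hLA : (List.map String.mk (['.'] :: ([] :: r1 :: rest0)))[2]? = some (String.mk r1) := by
    simp
  have hLB : (List.map String.mk (['.'] :: ancList ([] :: r1 :: r2 :: t3)))[2]?
      = some (String.mk ('/' :: r1)) := by
    rw [List.map_cons,
      show ∀ (a : String) (l : List String), (a :: l)[2]? = l[1]? from fun a l => rfl,
      List.getElem?_map, hBidx]
    rfl
  simp only [List.cons_append, List.nil_append] at h2
  rw [hLA, hLB] at h2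
  have hmk := Option.some.inj h2
  have hr1 : r1 = '/' :: r1 := by
    have h3 := congrArg String.toList hmk
    rw [show (String.mk r1).toList = r1 from Eq.symm ((fun {l} {s} => String.ofList_eq.mp) rfl),
      show (String.mk ('/' :: r1)).toList = '/' :: r1 from
        Eq.symm ((fun {l} {s} => String.ofList_eq.mp) rfl)] at h3
    exact h3
  have hlen := congrArg List.length hr1
  simp at hlen
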